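-- pv_equiv track=rewrite | github.com/fusetim/PPII1 | backend/lsh.py | shringles
-- ===== SOURCE A (Python) =====
-- def shringles(word: str, n: int) -> list[str]:
--     """
--     Produces the shringles set of a word.
--
--     Args:
--         - word (str): the given word
--         - n (int): shringle length
--
--     Returns:
--         List of distinct shringles (sorted in alphabetical order)
--
--     Raises:
--         - ValueError if n <= 0
--
--     Note: word SHOULD preferably be normalized beforehand.
--     """
--     if n <= 0:
--         raise ValueError(f"got n: {n}, expected: n > 0")
--     sh = set()
--     for i in range(0, len(word) - n + 1):
--         sh.add(word[i : i + n].lower())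
--     shl = list(sh)
--     shl.sort()
--     return shl
-- ===== SOURCE B (Python) =====
-- def shringles(word: str, n: int) -> list[str]:
--     if n <= 0:
--         raise ValueError(f"got n: {n}, expected: n > 0")
--     shl = []  # kept sorted and duplicate-free at all times
--     for i in range(0, len(word) - n + 1):
--         g = word[i:i + n].lower()
--         j = 0
--         while j < len(shl) and shl[j] < g:
--             j += 1
--         if j == len(shl) or shl[j] != g:
--             shl.insert(j, g)
--     return shl
-- ===== Notes on version B (the rewrite author's own statement) =====
-- stated objective: alternative
-- what changed: B never builds a set and never calls sort: it maintains one sorted duplicate-free list as its only state, locating each lowered n-gram's position by a scan and inserting it there unless already present (ordered-insertion dedup), versus A's hash-set accumulation followed by a final sort; the n<=0 ValueError guard is kept.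
import Mathlib
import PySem

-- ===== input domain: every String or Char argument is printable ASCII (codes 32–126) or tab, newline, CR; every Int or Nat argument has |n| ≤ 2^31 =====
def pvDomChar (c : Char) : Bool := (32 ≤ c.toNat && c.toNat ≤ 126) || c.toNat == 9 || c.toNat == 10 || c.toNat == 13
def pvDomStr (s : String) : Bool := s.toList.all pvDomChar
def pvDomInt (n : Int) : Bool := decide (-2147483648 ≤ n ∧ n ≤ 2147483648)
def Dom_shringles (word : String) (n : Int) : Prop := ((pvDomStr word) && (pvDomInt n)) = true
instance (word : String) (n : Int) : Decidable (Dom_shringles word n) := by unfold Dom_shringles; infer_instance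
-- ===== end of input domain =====

-- B keeps one sorted duplicate-free list and inserts each lowered n-gram at its scanned position
-- (ordered-insertion dedup, no set and no sort call) instead of A's set accumulation + final sort.

-- shared helper: word[i:i+n].lower()
def pvGram (word : String) (n : Int) (i : Int) : String :=
  String.ofList (PySem.Chars.lower (PySem.List.slice word.toList (some i) (some (i + n))))

-- ===== PORT A =====
def shringles (word : String) (n : Int) : List String :=
  let sh : PySem.Set String :=
    (PySem.List.pyRange 0 ((word.toList.length : Int) - n + 1) 1).foldl
      (fun s i => PySem.Set.add s (pvGram word n i)) PySem.Set.empty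
  PySem.List.sorted sh (fun x => x) false

-- ===== PORT B =====
-- the 'while j < len(shl) and shl[j] < g: j += 1' scan, as recursion over shl
def pvFindPos (g : String) : List String → Nat
  | [] => 0
  | x :: t => if x < g then pvFindPos g t + 1 else 0

def shringles_alt (word : String) (n : Int) : List String :=
  (PySem.List.pyRange 0 ((word.toList.length : Int) - n + 1) 1).foldl
    (fun shl i =>
      let g := pvGram word n i
      let j := pvFindPos g shl
      -- 'if j == len(shl) or shl[j] != g: shl.insert(j, g)' (shl[j] in range when read)
      if j = shl.length ∨ PySem.List.pyGet? shl (j : Int) ≠ some g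
      then PySem.List.insert shl (j : Int) g else shl) []

-- ===== PRECONDITION & SPEC =====
-- Pre_ excludes exactly n ≤ 0, where Python A raises ValueError (B raises the same).
def Pre_shringles (word : String) (n : Int) : Prop := 0 < n
instance (word : String) (n : Int) : Decidable (Pre_shringles word n) := by unfold Pre_shringles; infer_instance
def pvWitness_shringles : String × Int := ("Banana", 2)

def Spec_shringles (word : String) (n : Int) (out : List String) : Prop := out = shringles_alt word n
instance (word : String) (n : Int) (out : List String) : Decidable (Spec_shringles word n out) := by unfold Spec_shringles; infer_instance

-- ===== CLAIM (what is proved, stated in full; the proofs are below) =====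
def Claim_equal_shringles : Prop := ∀ (word : String) (n : Int), Dom_shringles word n → Pre_shringles word n → Spec_shringles word n (shringles word n)

-- ===== LEMMAS AND PROOFS =====

-- proof-side recursive form of B's find-position-then-insert step
def pvInsU (g : String) : List String → List String
  | [] => [g]
  | x :: t => if g < x then g :: x :: t else if g = x then x :: t else x :: pvInsU g t

theorem step_eq_pvInsU (g : String) (shl : List String) :
    (if pvFindPos g shl = shl.length ∨ PySem.List.pyGet? shl ((pvFindPos g shl : Nat) : Int) ≠ some g
     then PySem.List.insert shl ((pvFindPos g shl : Nat) : Int) g else shl) = pvInsU g shl := by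
  induction shl with
  | nil => simp [pvFindPos, pvInsU, PySem.List.insert_zero]
  | cons x t ih =>
    by_cases hx : x < g
    · have hpos : pvFindPos g (x :: t) = pvFindPos g t + 1 := by simp [pvFindPos, hx]
      have hle : pvFindPos g t ≤ t.length := by
        clear ih hpos
        induction t with
        | nil => simp [pvFindPos]
        | cons y u ihy =>
          by_cases hy : y < g
          · simp [pvFindPos, hy]; omega
          · simp [pvFindPos, hy]
      have hget : PySem.List.pyGet? (x :: t) ((pvFindPos g t + 1 : Nat) : Int)
          = PySem.List.pyGet? t ((pvFindPos g t : Nat) : Int) := by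
        simp [PySem.List.pyGet?_natCast]
      have hins : PySem.List.insert (x :: t) ((pvFindPos g t + 1 : Nat) : Int) g
          = x :: PySem.List.insert t ((pvFindPos g t : Nat) : Int) g := by
        rw [PySem.List.insert_natCast (x :: t) (pvFindPos g t + 1) g (by simp; omega),
            PySem.List.insert_natCast t (pvFindPos g t) g hle]
        simp
      have hnin : ¬ g < x := by exact fun h => absurd hx (not_lt_of_gt h)
      have hne : ¬ g = x := fun h => by subst h; exact lt_irrefl _ hx
      rw [hpos]
      simp only [pvInsU, if_neg hnin, if_neg hne]
      rw [hget, hins]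
      rw [← ih]
      by_cases hc : pvFindPos g t = t.length ∨ PySem.List.pyGet? t ((pvFindPos g t : Nat) : Int) ≠ some g
      · rw [if_pos hc, if_pos]
        rcases hc with h | h
        · left; simp [h]
        · right; exact h
      · push_neg at hc
        rw [if_neg (by push_neg; exact ⟨by simp; omega, hc.2⟩), if_neg (by push_neg; exact hc)]
    · have hpos : pvFindPos g (x :: t) = 0 := by simp [pvFindPos, hx]
      rw [hpos]
      by_cases hgx : g = x
      · subst hgx
        rw [if_neg]
        · simp [pvInsU, lt_irrefl]
        · push_neg
          exact ⟨by simp, by simp [PySem.List.pyGet?_zero_cons]⟩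
      · have hlt : g < x := lt_of_le_of_ne (not_lt.mp hx) hgx
        rw [if_pos]
        · simp [pvInsU, hlt, PySem.List.insert_zero]
        · right; simp [PySem.List.pyGet?_zero_cons]; exact fun h => hgx h.symm

theorem mem_pvInsU (g : String) (xs : List String) :
    ∀ x, x ∈ pvInsU g xs ↔ x = g ∨ x ∈ xs := by
  induction xs with
  | nil => intro x; simp [pvInsU]
  | cons y t ih =>
    intro x
    by_cases h1 : g < y
    · simp [pvInsU, h1]
    · by_cases h2 : g = y
      · subst h2; simp [pvInsU, h1]
      · simp [pvInsU, h1, h2, ih x]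
        tauto

theorem pairwise_pvInsU (g : String) (xs : List String) (hs : xs.Pairwise (· < ·)) :
    (pvInsU g xs).Pairwise (· < ·) := by
  induction xs with
  | nil => simp [pvInsU]
  | cons y t ih =>
    have hyt : ∀ b ∈ t, y < b := (List.pairwise_cons.mp hs).1
    have hst : t.Pairwise (· < ·) := (List.pairwise_cons.mp hs).2
    by_cases h1 : g < y
    · simp only [pvInsU, if_pos h1]
      refine List.pairwise_cons.mpr ⟨?_, hs⟩
      intro b hb
      rcases List.mem_cons.mp hb with rfl | hb
      · exact h1
      · exact lt_trans h1 (hyt b hb)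
    · by_cases h2 : g = y
      · simpa [pvInsU, h1, h2] using hs
      · have hyg : y < g := lt_of_le_of_ne (not_lt.mp h1) (fun h => h2 h.symm)
        simp only [pvInsU, if_neg h1, if_neg h2]
        refine List.pairwise_cons.mpr ⟨?_, ih hst⟩
        intro b hb
        rcases (mem_pvInsU g t b).mp hb with rfl | hb
        · exact hyg
        · exact hyt b hb

theorem foldl_pvInsU (gs : List String) : ∀ (acc : List String), acc.Pairwise (· < ·) →
    ((gs.foldl (fun a g => pvInsU g a) acc).Pairwise (· < ·)
      ∧ ∀ x, x ∈ gs.foldl (fun a g => pvInsU g a) acc ↔ x ∈ gs ∨ x ∈ acc) := by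
  induction gs with
  | nil => intro acc h; exact ⟨h, by simp⟩
  | cons g t ih =>
    intro acc h
    obtain ⟨h1, h2⟩ := ih (pvInsU g acc) (pairwise_pvInsU g acc h)
    refine ⟨h1, ?_⟩
    intro x
    rw [List.foldl_cons] at *
    rw [h2 x, mem_pvInsU]
    simp
    tauto

-- ===== VERDICT (by name: the statement is the Claim_ definition above) =====
theorem shringles_spec : Claim_equal_shringles := by
  intro word n _ _
  unfold Spec_shringles shringles shringles_alt
  set R := PySem.List.pyRange 0 ((word.toList.length : Int) - n + 1) 1 with hR
  set L := R.map (pvGram word n) with hL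
  have hA : R.foldl (fun s i => PySem.Set.add s (pvGram word n i)) PySem.Set.empty
      = PySem.Set.ofList L := by
    rw [hL, PySem.Set.ofList_eq_foldl, List.foldl_map]; rfl
  have hB : R.foldl
      (fun shl i =>
        let g := pvGram word n i
        let j := pvFindPos g shl
        if j = shl.length ∨ PySem.List.pyGet? shl (j : Int) ≠ some g
        then PySem.List.insert shl (j : Int) g else shl) []
      = L.foldl (fun a g => pvInsU g a) [] := by
    rw [hL, List.foldl_map]
    have hfun : (fun (shl : List String) (i : Int) =>
        let g := pvGram word n i
        let j := pvFindPos g shl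
        if j = shl.length ∨ PySem.List.pyGet? shl ((j : Nat) : Int) ≠ some g
        then PySem.List.insert shl ((j : Nat) : Int) g else shl)
      = fun shl i => pvInsU (pvGram word n i) shl := by
      funext shl i
      exact step_eq_pvInsU (pvGram word n i) shl
    rw [hfun]
  obtain ⟨hpw, hmem⟩ := foldl_pvInsU L [] (by simp)
  set ys := L.foldl (fun a g => pvInsU g a) [] with hys
  have hperm : ys.Perm (PySem.Set.ofList L) := by
    apply (List.perm_ext_iff_of_nodup (hpw.imp (fun h => ne_of_lt h)) (PySem.Set.nodup_ofList L)).mpr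
    intro x
    rw [hmem x, PySem.Set.mem_ofList]
    simp
  rw [hA, hB]
  exact PySem.List.sorted_eq_of_perm_of_pairwise_lt _ ys (fun x => x) hperm hpw
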